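-- pv_equiv track=rewrite | github.com/AvishaiColman/goph419-f2024-examples | src/goph419/binary.py | bin_add_4
-- ===== SOURCE A (Python) =====
-- def bin_add_4(a, b):
--     """Add two four bit binary numbers.
--     Most significant bit first.
--
--     Inputs
--     ------
--     a : iterable[bool]
--     b : iterable[bool]
--
--     Returns
--     -------
--     list[bool]
--     """
--     res = [int(bool(x)) for x in a]
--     add = [int(bool(x)) for x in b]
--     for _ in range(4):
--         for k in range(4):
--             res[k] ^= add[k]
--             add[k] = add[k + 1] & res[k + 1] if k < 3 else 0
--     return res
-- ===== SOURCE B (Python) =====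
-- def bin_add_4(a, b):
--     x = [int(bool(v)) for v in a]
--     y = [int(bool(v)) for v in b]
--     res = list(x)
--     carry = 0
--     for k in range(3, -1, -1):
--         s = x[k] + y[k] + carry
--         res[k] = s % 2
--         carry = s // 2
--     return res
-- ===== Notes on version B (the rewrite author's own statement) =====
-- stated objective: simpler
-- what changed: A's four fixed sweeps of XOR-then-shifted-AND carry propagation are replaced by a single right-to-left ripple-carry pass keeping one carry variable.
import Mathlib
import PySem

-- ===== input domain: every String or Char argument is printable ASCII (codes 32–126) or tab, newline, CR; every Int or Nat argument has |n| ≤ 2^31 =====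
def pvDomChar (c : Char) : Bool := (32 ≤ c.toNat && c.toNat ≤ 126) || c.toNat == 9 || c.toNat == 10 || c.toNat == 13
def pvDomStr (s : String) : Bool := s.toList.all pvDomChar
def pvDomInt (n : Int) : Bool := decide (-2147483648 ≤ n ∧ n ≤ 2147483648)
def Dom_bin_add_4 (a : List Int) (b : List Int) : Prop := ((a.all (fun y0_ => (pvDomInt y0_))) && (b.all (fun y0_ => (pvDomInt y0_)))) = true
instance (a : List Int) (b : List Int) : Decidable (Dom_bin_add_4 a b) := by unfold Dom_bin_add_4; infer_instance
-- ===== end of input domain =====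

-- B replaces A's four fixed XOR/carry sweeps by a single right-to-left ripple-carry pass (objective: simpler).

-- int(bool(x)) for an int x
def pvNorm (x : Int) : Int := if x ≠ 0 then 1 else 0

-- xs[k]; every index used is in range whenever Pre_bin_add_4 holds (0 ≤ k ≤ 3 < 4 ≤ length); Python raises IndexError on shorter lists
def pvGet (xs : List Int) (k : Int) : Int := PySem.List.pyGetD xs k 0

-- ===== PORT A =====
-- body of A's inner loop: res[k] ^= add[k]; add[k] = add[k + 1] & res[k + 1] if k < 3 else 0
def pvStepA (st : List Int × List Int) (k : Int) : List Int × List Int :=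
  let res := st.1.set k.toNat (PySem.Int.bxor (pvGet st.1 k) (pvGet st.2 k))
  let add := st.2.set k.toNat
    (if k < 3 then PySem.Int.band (pvGet st.2 (k + 1)) (pvGet res (k + 1)) else 0)
  (res, add)

def bin_add_4 (a : List Int) (b : List Int) : List Int :=
  ((PySem.List.pyRange 0 4 1).foldl (fun st _ =>
    (PySem.List.pyRange 0 4 1).foldl pvStepA st) (a.map pvNorm, b.map pvNorm)).1

-- ===== PORT B =====
-- body of B's loop over range(3, -1, -1): s = x[k] + y[k] + carry; res[k] = s % 2; carry = s // 2
def pvStepB (x y : List Int) (st : List Int × Int) (k : Int) : List Int × Int :=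
  let s := pvGet x k + pvGet y k + st.2
  (st.1.set k.toNat (PySem.Int.mod s 2), PySem.Int.floordiv s 2)

def bin_add_4_alt (a : List Int) (b : List Int) : List Int :=
  let x := a.map pvNorm
  let y := b.map pvNorm
  ((PySem.List.pyRange 3 (-1) (-1)).foldl (pvStepB x y) (x, 0)).1

-- ===== PRECONDITION & SPEC =====
-- Python A raises IndexError when either argument has fewer than 4 elements
def Pre_bin_add_4 (a : List Int) (b : List Int) : Prop := 4 ≤ a.length ∧ 4 ≤ b.length
instance (a : List Int) (b : List Int) : Decidable (Pre_bin_add_4 a b) := by unfold Pre_bin_add_4; infer_instance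
def pvWitness_bin_add_4 : List Int × List Int := ([1, 0, 1, 1], [0, 1, 1, 0])

def Spec_bin_add_4 (a : List Int) (b : List Int) (out : List Int) : Prop := out = bin_add_4_alt a b
instance (a : List Int) (b : List Int) (out : List Int) : Decidable (Spec_bin_add_4 a b out) := by unfold Spec_bin_add_4; infer_instance

-- ===== CLAIM (what is proved, stated in full; the proofs are below) =====
def Claim_equal_bin_add_4 : Prop := ∀ (a : List Int) (b : List Int), Dom_bin_add_4 a b → Pre_bin_add_4 a b → Spec_bin_add_4 a b (bin_add_4 a b)

-- ===== LEMMAS AND PROOFS =====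
def pvBit (c : Bool) : Int := if c then 1 else 0

-- A's and B's full loops restricted to the four leading bits (closed helpers for the proof)
def pvCoreA (r s : List Int) : List Int :=
  ((PySem.List.pyRange 0 4 1).foldl (fun st _ =>
    (PySem.List.pyRange 0 4 1).foldl pvStepA st) (r, s)).1

def pvCoreB (r s : List Int) : List Int :=
  ((PySem.List.pyRange 3 (-1) (-1)).foldl (pvStepB r s) (r, 0)).1

theorem pvNorm_eq_bit (x : Int) : pvNorm x = pvBit (decide (x ≠ 0)) := by
  by_cases h : x = 0 <;> simp [pvNorm, pvBit, h]

-- reading index 0 ≤ k < r.length only sees the front part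
theorem pvGet_append (r t : List Int) (k : Int) (h0 : 0 ≤ k) (h4 : k < (r.length : Int)) :
    pvGet (r ++ t) k = pvGet r k := by
  rw [pvGet, pvGet,
    PySem.List.pyGetD_eq_getElem (r ++ t) 0 h0 (by simp; omega),
    PySem.List.pyGetD_eq_getElem r 0 h0 (by exact_mod_cast h4)]
  exact List.getElem_append_left (by omega)

theorem pvSet_append (r t : List Int) (n : Nat) (v : Int) (h : n < r.length) :
    (r ++ t).set n v = r.set n v ++ t := List.set_append_left n v h

-- one A-step on 4-element fronts never looks at the tails
theorem pvStepA_append (r s t u : List Int) (k : Int)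
    (hr : r.length = 4) (hs : s.length = 4) (h0 : 0 ≤ k) (h4 : k < 4) :
    pvStepA (r ++ t, s ++ u) k = ((pvStepA (r, s) k).1 ++ t, (pvStepA (r, s) k).2 ++ u) := by
  simp only [pvStepA]
  by_cases hk : k < 3
  · simp only [if_pos hk]
    rw [pvGet_append r t k h0 (by omega), pvGet_append s u k h0 (by omega),
        pvSet_append r t k.toNat _ (by omega),
        pvGet_append s u (k + 1) (by omega) (by omega),
        pvGet_append (r.set k.toNat _) t (k + 1) (by omega) (by simp [hr]; omega),
        pvSet_append s u k.toNat _ (by omega)]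
  · simp only [if_neg hk]
    rw [pvGet_append r t k h0 (by omega), pvGet_append s u k h0 (by omega),
        pvSet_append r t k.toNat _ (by omega),
        pvSet_append s u k.toNat _ (by omega)]

theorem pvStepA_len (r s : List Int) (k : Int) :
    ((pvStepA (r, s) k).1.length = r.length) ∧ ((pvStepA (r, s) k).2.length = s.length) := by
  simp [pvStepA]

-- the inner A-fold over indices 0..3 keeps the tails intact
theorem pvFoldA_append (ks : List Int) (r s t u : List Int)
    (hr : r.length = 4) (hs : s.length = 4) (hks : ∀ k ∈ ks, 0 ≤ k ∧ k < 4) :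
    ks.foldl pvStepA (r ++ t, s ++ u)
      = ((ks.foldl pvStepA (r, s)).1 ++ t, (ks.foldl pvStepA (r, s)).2 ++ u) := by
  induction ks generalizing r s with
  | nil => rfl
  | cons k ks ih =>
    obtain ⟨h0, h4⟩ := hks k List.mem_cons_self
    simp only [List.foldl_cons]
    rw [pvStepA_append r s t u k hr hs h0 h4]
    have hlen := pvStepA_len r s k
    exact ih (pvStepA (r, s) k).1 (pvStepA (r, s) k).2 (hlen.1.trans hr) (hlen.2.trans hs)
      (fun k' hk' => hks k' (List.mem_cons_of_mem _ hk'))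

theorem pvFoldA_len (ks : List Int) (r s : List Int) :
    ((ks.foldl pvStepA (r, s)).1.length = r.length) ∧ ((ks.foldl pvStepA (r, s)).2.length = s.length) := by
  induction ks generalizing r s with
  | nil => exact ⟨rfl, rfl⟩
  | cons k ks ih =>
    simp only [List.foldl_cons]
    have h1 := pvStepA_len r s k
    have h2 := ih (pvStepA (r, s) k).1 (pvStepA (r, s) k).2
    exact ⟨h2.1.trans h1.1, h2.2.trans h1.2⟩

-- A's whole double loop over 4-element fronts
theorem pvOuterA (os : List Int) (r s t u : List Int) (hr : r.length = 4) (hs : s.length = 4) :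
    os.foldl (fun st _ => (PySem.List.pyRange 0 4 1).foldl pvStepA st) (r ++ t, s ++ u)
      = ((os.foldl (fun st _ => (PySem.List.pyRange 0 4 1).foldl pvStepA st) (r, s)).1 ++ t,
         (os.foldl (fun st _ => (PySem.List.pyRange 0 4 1).foldl pvStepA st) (r, s)).2 ++ u) := by
  have hrange : PySem.List.pyRange 0 4 1 = [0, 1, 2, 3] := by decide
  have hks : ∀ k ∈ PySem.List.pyRange 0 4 1, (0:Int) ≤ k ∧ k < 4 := by
    rw [hrange]; decide
  induction os generalizing r s with
  | nil => rfl
  | cons o os ih =>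
    simp only [List.foldl_cons]
    rw [pvFoldA_append _ r s t u hr hs hks]
    have hlen := pvFoldA_len (PySem.List.pyRange 0 4 1) r s
    exact ih _ _ (hlen.1.trans hr) (hlen.2.trans hs)

-- one B-step likewise
theorem pvStepB_append (r s q t u : List Int) (c : Int) (k : Int)
    (hr : r.length = 4) (hs : s.length = 4) (hq : q.length = 4) (h0 : 0 ≤ k) (h4 : k < 4) :
    pvStepB (r ++ t) (s ++ u) (q ++ t, c) k
      = ((pvStepB r s (q, c) k).1 ++ t, (pvStepB r s (q, c) k).2) := by
  simp only [pvStepB]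
  rw [pvGet_append r t k h0 (by omega), pvGet_append s u k h0 (by omega),
      pvSet_append q t k.toNat _ (by omega)]

theorem pvFoldB_append (ks : List Int) (r s q t u : List Int) (c : Int)
    (hr : r.length = 4) (hs : s.length = 4) (hq : q.length = 4) (hks : ∀ k ∈ ks, 0 ≤ k ∧ k < 4) :
    ks.foldl (pvStepB (r ++ t) (s ++ u)) (q ++ t, c)
      = ((ks.foldl (pvStepB r s) (q, c)).1 ++ t, (ks.foldl (pvStepB r s) (q, c)).2) := by
  induction ks generalizing q c with
  | nil => rfl
  | cons k ks ih =>
    obtain ⟨h0, h4⟩ := hks k List.mem_cons_self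
    simp only [List.foldl_cons]
    rw [pvStepB_append r s q t u c k hr hs hq h0 h4]
    have hlen : (pvStepB r s (q, c) k).1.length = q.length := by simp [pvStepB]
    exact ih (pvStepB r s (q, c) k).1 (pvStepB r s (q, c) k).2 (hlen.trans hq)
      (fun k' hk' => hks k' (List.mem_cons_of_mem _ hk'))

-- the closed four-bit cores agree, checked over all 256 bit patterns
theorem pvKey : ∀ (c0 c1 c2 c3 d0 d1 d2 d3 : Bool),
    pvCoreA [pvBit c0, pvBit c1, pvBit c2, pvBit c3] [pvBit d0, pvBit d1, pvBit d2, pvBit d3]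
      = pvCoreB [pvBit c0, pvBit c1, pvBit c2, pvBit c3] [pvBit d0, pvBit d1, pvBit d2, pvBit d3] := by
  decide

-- ===== VERDICT (by name: the statement is the Claim_ definition above) =====
theorem bin_add_4_spec : Claim_equal_bin_add_4 := by
  intro a b _ hpre
  obtain ⟨ha, hb⟩ := hpre
  rcases a with _ | ⟨a0, _ | ⟨a1, _ | ⟨a2, _ | ⟨a3, t⟩⟩⟩⟩ <;> simp at ha
  rcases b with _ | ⟨b0, _ | ⟨b1, _ | ⟨b2, _ | ⟨b3, u⟩⟩⟩⟩ <;> simp at hb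
  show bin_add_4 _ _ = bin_add_4_alt _ _
  have hmapa : (a0 :: a1 :: a2 :: a3 :: t).map pvNorm
      = [pvNorm a0, pvNorm a1, pvNorm a2, pvNorm a3] ++ t.map pvNorm := by simp
  have hmapb : (b0 :: b1 :: b2 :: b3 :: u).map pvNorm
      = [pvNorm b0, pvNorm b1, pvNorm b2, pvNorm b3] ++ u.map pvNorm := by simp
  have hks : ∀ k ∈ PySem.List.pyRange 3 (-1) (-1), (0:Int) ≤ k ∧ k < 4 := by decide
  rw [bin_add_4, bin_add_4_alt, hmapa, hmapb]
  rw [pvOuterA _ _ _ _ _ (by simp) (by simp)]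
  rw [pvFoldB_append _ _ _ _ _ _ _ (by simp) (by simp) (by simp) hks]
  show pvCoreA _ _ ++ t.map pvNorm = pvCoreB _ _ ++ t.map pvNorm
  simp only [pvNorm_eq_bit]
  rw [pvKey]
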